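-- pv_equiv track=rewrite | github.com/dmontalvo51/sanmarcos-labs | geografica/Python/Final/contarPosiSumarNega.py | contarPositivosSumarNegativos
-- ===== SOURCE A (Python) =====
-- def contarPositivosSumarNegativos(lista):
--     cuenta = 0
--     suma = 0
--
--     if len(lista) == 0:
--         return None
--
--     for num in lista:
--         if num > 0:
--             cuenta += 1
--         elif num < 0:
--             suma += num
--
--     return [cuenta, suma]
-- ===== SOURCE B (Python) =====
-- def _go(xs):
--     # divide and conquer: (count of positives, sum of negatives) of xs
--     if len(xs) <= 1:
--         if not xs:
--             return (0, 0)
--         x = xs[0]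
--         if x > 0:
--             return (1, 0)
--         if x < 0:
--             return (0, x)
--         return (0, 0)
--     m = len(xs) // 2
--     c1, s1 = _go(xs[:m])
--     c2, s2 = _go(xs[m:])
--     return (c1 + c2, s1 + s2)
--
-- def contarPositivosSumarNegativos(lista):
--     if len(lista) == 0:
--         return None
--     c, s = _go(lista)
--     return [c, s]
-- ===== Notes on version B (the rewrite author's own statement) =====
-- stated objective: alternative
-- what changed: Replaces the single left-to-right loop with two mutable accumulators by a recursive divide-and-conquer: the list is split in half, each half's (positive-count, negative-sum) pair is computed recursively, and the pairs are combined by componentwise addition.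
import Mathlib
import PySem

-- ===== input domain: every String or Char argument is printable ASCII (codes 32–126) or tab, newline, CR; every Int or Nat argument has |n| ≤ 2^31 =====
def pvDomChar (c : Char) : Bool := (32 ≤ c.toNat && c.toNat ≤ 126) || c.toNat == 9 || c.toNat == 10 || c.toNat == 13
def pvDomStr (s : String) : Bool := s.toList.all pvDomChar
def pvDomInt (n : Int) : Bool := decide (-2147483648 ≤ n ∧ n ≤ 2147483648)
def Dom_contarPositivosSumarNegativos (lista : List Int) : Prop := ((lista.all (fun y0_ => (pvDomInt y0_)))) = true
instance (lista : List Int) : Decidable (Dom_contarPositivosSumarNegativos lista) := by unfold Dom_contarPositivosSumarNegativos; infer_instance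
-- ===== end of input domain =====

-- ===== PORT A =====
-- A: one fused loop carrying (cuenta, suma); faithful fold over the list.
def contarPositivosSumarNegativos (lista : List Int) : Option (List Int) :=
  if lista.length = 0 then none
  else
    let st := lista.foldl (fun (cs : Int × Int) num =>
      if num > 0 then (cs.1 + 1, cs.2)
      else if num < 0 then (cs.1, cs.2 + num)
      else cs) (0, 0)
    some [st.1, st.2]

-- ===== PORT B =====
-- B: divide and conquer; _go splits the list in half, recurses, adds the pairs.
def pvGo (xs : List Int) : Int × Int :=
  if h : xs.length ≤ 1 then
    match xs with
    | [] => (0, 0)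
    | x :: _ => if x > 0 then (1, 0) else if x < 0 then (0, x) else (0, 0)
  else
    let m := xs.length / 2
    let l := pvGo (xs.take m)
    let r := pvGo (xs.drop m)
    (l.1 + r.1, l.2 + r.2)
termination_by xs.length
decreasing_by
  · simp only [List.length_take]; omega
  · simp only [List.length_drop]; omega

def contarPositivosSumarNegativos_alt (lista : List Int) : Option (List Int) :=
  if lista.length = 0 then none
  else
    let cs := pvGo lista
    some [cs.1, cs.2]

-- ===== PRECONDITION & SPEC =====
def Spec_contarPositivosSumarNegativos (lista : List Int) (out : Option (List Int)) : Prop := out = contarPositivosSumarNegativos_alt lista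
instance (lista : List Int) (out : Option (List Int)) : Decidable (Spec_contarPositivosSumarNegativos lista out) := by unfold Spec_contarPositivosSumarNegativos; infer_instance

-- ===== CLAIM (what is proved, stated in full; the proofs are below) =====
def Claim_equal_contarPositivosSumarNegativos : Prop := ∀ (lista : List Int), Dom_contarPositivosSumarNegativos lista → Spec_contarPositivosSumarNegativos lista (contarPositivosSumarNegativos lista)

-- ===== LEMMAS AND PROOFS =====

-- ===== VERDICT (by name: the statement is the Claim_ definition above) =====
theorem foldA_eq (lista : List Int) (c s : Int) :
    lista.foldl (fun (cs : Int × Int) num =>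
      if num > 0 then (cs.1 + 1, cs.2)
      else if num < 0 then (cs.1, cs.2 + num)
      else cs) (c, s)
    = (c + ((lista.filter (fun x => x > 0)).map (fun _ => (1 : Int))).sum,
       s + (lista.filter (fun x => x < 0)).sum) := by
  induction lista generalizing c s with
  | nil => simp
  | cons h t ih =>
    by_cases hp : h > 0
    · have hn : ¬ h < 0 := by omega
      simp [List.foldl, hp, hn, ih]; ring
    · by_cases hn : h < 0
      · simp [List.foldl, hp, hn, ih]; ring
      · simp [List.foldl, hp, hn, ih]

theorem pvGo_eq (xs : List Int) :
    pvGo xs = (((xs.filter (fun x => x > 0)).map (fun _ => (1 : Int))).sum,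
               (xs.filter (fun x => x < 0)).sum) := by
  generalize hn : xs.length = n
  induction n using Nat.strong_induction_on generalizing xs with
  | _ n ih =>
    unfold pvGo
    by_cases h : xs.length ≤ 1
    · rw [dif_pos h]
      cases xs with
      | nil => simp
      | cons x rest =>
        have hrest : rest = [] := by
          cases rest with
          | nil => rfl
          | cons a b => simp at h
        subst hrest
        by_cases hp : x > 0
        · have hneg : ¬ x < 0 := by omega
          simp [hp, hneg]
        · by_cases hneg : x < 0
          · simp [hp, hneg]
          · simp [hp, hneg]
    · rw [dif_neg h]
      dsimp only
      have h1 : (xs.take (xs.length / 2)).length < n := by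
        simp only [List.length_take]; omega
      have h2 : (xs.drop (xs.length / 2)).length < n := by
        simp only [List.length_drop]; omega
      have hsplit : xs = xs.take (xs.length / 2) ++ xs.drop (xs.length / 2) :=
        (List.take_append_drop _ _).symm
      rw [ih _ h1 _ rfl, ih _ h2 _ rfl]
      conv_rhs => rw [hsplit]
      rw [List.filter_append, List.filter_append, List.map_append,
        List.sum_append, List.sum_append]

theorem contarPositivosSumarNegativos_spec : Claim_equal_contarPositivosSumarNegativos := by
  intro lista _
  unfold Spec_contarPositivosSumarNegativos contarPositivosSumarNegativos contarPositivosSumarNegativos_alt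
  rw [foldA_eq, pvGo_eq]
  simp
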